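-- pv_equiv track=rewrite | github.com/bellecode20/algorithm-study | Su/season_02/week_01/problem_03_행렬과연산.py | solution
-- ===== SOURCE A (Python) =====
-- from collections import deque
--
-- def solution(rc, operations):
--     start = deque()
--     mid = deque()
--     end = deque()
--     for i in rc: # row 마다 추가하기
--         start.append(i[0])
--         mid.append(deque(i[1:len(i)-1]))
--         end.append(i[len(i)-1])
--     for op in operations:
--         if op == "Rotate":
--             mid[0].appendleft(start.popleft())
--             end.appendleft(mid[0].pop())
--             mid[len(mid)-1].append(end.pop())
--             start.append(mid[len(mid)-1].popleft())
--         elif op == "ShiftRow":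
--             start.rotate()
--             mid.rotate()
--             end.rotate()
--     answer = []
--     for i in range(len(rc)):
--         row = [start[i]] + list(mid[i]) + [end[i]]
--         answer.append(row)
--     return answer
-- ===== SOURCE B (Python) =====
-- def solution(rc, operations):
--     # Row-level functional rewrite. Each row is viewed as first cell + middle + last cell
--     # (the three tracks the operations act on); every op maps rows to a new list of rows.
--     rows = [[r[0]] + r[1:-1] + [r[-1]] for r in rc]
--     for op in operations:
--         if op == "Rotate":
--             top, *rest = rows
--             *body, bottom = rest
--             new_top = [rest[0][0]] + top[:-1]
--             new_body = [[nxt[0]] + row[1:-1] + [prev[-1]]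
--                         for row, nxt, prev in zip(body, rest[1:], rows)]
--             new_bottom = bottom[1:] + [rows[-2][-1]]
--             rows = [new_top] + new_body + [new_bottom]
--         elif op == "ShiftRow":
--             rows = rows[-1:] + rows[:-1]
--     return rows
-- ===== Notes on version B (the rewrite author's own statement) =====
-- stated objective: alternative
-- what changed: A mutates three deques (first-column, middle-cells, last-column) in place; B is a pure functional rewrite on the whole list of rows, computing each operation's new matrix from the old one by row-level slicing. Pre_ excludes empty rows and 'Rotate' on a matrix with fewer than two rows: on empty rows A raises IndexError, on 'Rotate' over an empty matrix A raises IndexError, and on 'Rotate' over a single-row matrix A's deque juggling returns an accidental swap of the row's last two cells while B's top/bottom row unpacking raises ValueError.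
-- outside the precondition, e.g. on solution([[1, 2, 3]], ['Rotate']): A returns [[1, 3, 2]], B raises ValueError
import Mathlib
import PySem

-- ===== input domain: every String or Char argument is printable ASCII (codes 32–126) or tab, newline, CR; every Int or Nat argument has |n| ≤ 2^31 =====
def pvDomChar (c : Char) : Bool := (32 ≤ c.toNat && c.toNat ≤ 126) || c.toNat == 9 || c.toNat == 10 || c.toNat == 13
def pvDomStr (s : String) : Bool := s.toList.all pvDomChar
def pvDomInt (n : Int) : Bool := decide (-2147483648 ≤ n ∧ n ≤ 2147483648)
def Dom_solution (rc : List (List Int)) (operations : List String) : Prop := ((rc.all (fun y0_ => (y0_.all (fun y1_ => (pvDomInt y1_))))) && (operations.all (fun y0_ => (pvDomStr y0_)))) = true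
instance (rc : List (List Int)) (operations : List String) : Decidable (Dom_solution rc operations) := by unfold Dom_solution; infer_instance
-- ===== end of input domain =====

-- B changes the data structure: A mutates three deques (first column / middle cells / last
-- column) in place; B is a pure whole-matrix rewrite, each op mapping the list of rows to a
-- new list of rows by row-level slicing. Return-value equivalence (A does not mutate rc).

-- ===== PORT A =====
-- deque.rotate(): move the last element to the front (no-op on the empty deque)
def pyRotDeque {α : Type} (l : List α) : List α :=
  match l.getLast? with
  | none => []
  | some x => x :: l.dropLast

-- body of A's first loop: start.append(i[0]); mid.append(deque(i[1:len(i)-1])); end.append(i[len(i)-1])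
def buildA (st : List Int × List (List Int) × List Int) (i : List Int) :
    List Int × List (List Int) × List Int :=
  (st.1 ++ [PySem.List.pyGetD i 0 0],
   st.2.1 ++ [PySem.List.slice i (some 1) (some (PySem.List.len i - 1))],
   st.2.2 ++ [PySem.List.pyGetD i (PySem.List.len i - 1) 0])

-- one iteration of A's `for op in operations` loop, state = (start, mid, end)
def stepA (st : List Int × List (List Int) × List Int) (op : String) :
    List Int × List (List Int) × List Int :=
  let s := st.1; let m := st.2.1; let e := st.2.2
  if op = "Rotate" then
    -- mid[0].appendleft(start.popleft())
    let x := PySem.List.pyGetD s 0 0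
    let s := s.tail
    let m := PySem.List.pySetD m 0 (x :: PySem.List.pyGetD m 0 [])
    -- end.appendleft(mid[0].pop())
    let y := PySem.List.pyGetD (PySem.List.pyGetD m 0 []) (-1) 0
    let m := PySem.List.pySetD m 0 (PySem.List.pyGetD m 0 []).dropLast
    let e := y :: e
    -- mid[len(mid)-1].append(end.pop())
    let z := PySem.List.pyGetD e (-1) 0
    let e := e.dropLast
    let m := PySem.List.pySetD m (PySem.List.len m - 1)
              (PySem.List.pyGetD m (PySem.List.len m - 1) [] ++ [z])
    -- start.append(mid[len(mid)-1].popleft())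
    let w := PySem.List.pyGetD (PySem.List.pyGetD m (PySem.List.len m - 1) []) 0 0
    let m := PySem.List.pySetD m (PySem.List.len m - 1)
              (PySem.List.pyGetD m (PySem.List.len m - 1) []).tail
    let s := s ++ [w]
    (s, m, e)
  else if op = "ShiftRow" then
    (pyRotDeque s, pyRotDeque m, pyRotDeque e)
  else (s, m, e)

def solution (rc : List (List Int)) (operations : List String) : List (List Int) :=
  let st := rc.foldl buildA ([], [], [])
  let st := operations.foldl stepA st
  (PySem.List.pyRange 0 (PySem.List.len rc) 1).map (fun i =>
    PySem.List.pyGetD st.1 i 0 :: PySem.List.pyGetD st.2.1 i [] ++ [PySem.List.pyGetD st.2.2 i 0])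

-- ===== PORT B =====
-- [r[0]] + r[1:-1] + [r[-1]]
def normRow (r : List Int) : List Int :=
  PySem.List.pyGetD r 0 0 ::
    (PySem.List.slice r (some 1) (some (-1)) ++ [PySem.List.pyGetD r (-1) 0])

-- B's "Rotate" block; the `t :: r0 :: rs` match is Python's
-- `top, *rest = rows; *body, bottom = rest` (which raises for fewer than 2 rows: outside Pre_)
def rotateRows (rows : List (List Int)) : List (List Int) :=
  match rows with
  | t :: r0 :: rs =>
    let rest := r0 :: rs
    let body := rest.dropLast
    let bottom := rest.getLast (by simp)
    let newTop := PySem.List.pyGetD r0 0 0 :: PySem.List.slice t none (some (-1))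
    let newBody := (body.zip (rs.zip (t :: rest))).map (fun p =>
      PySem.List.pyGetD p.2.1 0 0 ::
        (PySem.List.slice p.1 (some 1) (some (-1)) ++ [PySem.List.pyGetD p.2.2 (-1) 0]))
    let newBottom := PySem.List.slice bottom (some 1) none ++
      [PySem.List.pyGetD (PySem.List.pyGetD (t :: rest) (-2) []) (-1) 0]
    newTop :: (newBody ++ [newBottom])
  | other => other

-- one iteration of B's loop on the list of rows
def stepB (rows : List (List Int)) (op : String) : List (List Int) :=
  if op = "Rotate" then
    rotateRows rows
  else if op = "ShiftRow" then
    PySem.List.slice rows (some (-1)) none ++ PySem.List.slice rows none (some (-1))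
  else rows

def solution_alt (rc : List (List Int)) (operations : List String) : List (List Int) :=
  operations.foldl stepB (rc.map normRow)

-- ===== PRECONDITION & SPEC =====
-- Pre_ excludes exactly the inputs outside the task's natural domain: an empty row (A raises
-- IndexError on i[0]) and "Rotate" on a matrix with fewer than 2 rows (on 0 rows A raises
-- IndexError; on 1 row A returns an accidental swap of the row's last two cells — an artefact
-- of its deque juggling — while B's top/bottom row unpacking raises ValueError).
def Pre_solution (rc : List (List Int)) (operations : List String) : Prop :=
  (∀ r ∈ rc, r ≠ []) ∧ ("Rotate" ∈ operations → 2 ≤ rc.length)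
instance (rc : List (List Int)) (operations : List String) : Decidable (Pre_solution rc operations) := by
  unfold Pre_solution; infer_instance

def pvWitness_solution : List (List Int) × List String :=
  ([[1, 2, 3], [4, 5, 6], [7, 8, 9]], ["Rotate", "ShiftRow", "Rotate"])

def Spec_solution (rc : List (List Int)) (operations : List String) (out : List (List Int)) : Prop := out = solution_alt rc operations
instance (rc : List (List Int)) (operations : List String) (out : List (List Int)) : Decidable (Spec_solution rc operations out) := by unfold Spec_solution; infer_instance

-- ===== CLAIM (what is proved, stated in full; the proofs are below) =====
def Claim_equal_solution : Prop := ∀ (rc : List (List Int)) (operations : List String), Dom_solution rc operations → Pre_solution rc operations → Spec_solution rc operations (solution rc operations)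

-- ===== LEMMAS AND PROOFS =====

-- A-side projections of a row: i[0], i[1:len(i)-1], i[len(i)-1]
def hdF (r : List Int) : Int := PySem.List.pyGetD r 0 0
def midF (r : List Int) : List Int := PySem.List.slice r (some 1) (some (PySem.List.len r - 1))
def lstF (r : List Int) : Int := PySem.List.pyGetD r (PySem.List.len r - 1) 0

-- every row has at least two cells
def SH (rows : List (List Int)) : Prop := ∀ r ∈ rows, 2 ≤ r.length

-- the (start, mid, end) triple a list of rows denotes
def dec (rows : List (List Int)) : List Int × List (List Int) × List Int :=
  (rows.map hdF, rows.map midF, rows.map lstF)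

-- ---- generic list helpers ----

lemma getLast_cons_concat {α : Type} (x y : α) (l : List α) (h : x :: (l ++ [y]) ≠ []) :
    (x :: (l ++ [y])).getLast h = y := (List.getLast_cons (by simp)).trans List.getLast_concat

lemma dropLast_cons_concat {α : Type} (x y : α) (l : List α) :
    (x :: (l ++ [y])).dropLast = x :: l := by
  rw [← List.cons_append, List.dropLast_concat]

lemma getLast_cons2_concat {α : Type} (x z y : α) (l : List α) (h : x :: (z :: (l ++ [y])) ≠ []) :
    (x :: (z :: (l ++ [y]))).getLast h = y :=
  (List.getLast_cons (by simp)).trans ((List.getLast_cons (by simp)).trans List.getLast_concat)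

lemma dropLast_cons2_concat {α : Type} (x z y : α) (l : List α) :
    (x :: (z :: (l ++ [y]))).dropLast = x :: z :: l := by
  rw [← List.cons_append, ← List.cons_append, List.dropLast_concat]

lemma map_dropLast_getLast {α β : Type} (f : α → β) (l : List α) (h : l ≠ []) :
    l.dropLast.map f ++ [f (l.getLast h)] = l.map f := by
  conv_rhs => rw [← List.dropLast_concat_getLast h]
  rw [List.map_append, List.map_cons, List.map_nil]

-- ---- PySem indexing helpers ----

lemma pyGetD_last {α : Type} (l : List α) (d : α) (h : l ≠ []) :
    PySem.List.pyGetD l (PySem.List.len l - 1) d = l.getLast h := by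
  have hp : 0 < l.length := List.length_pos_of_ne_nil h
  have h1 : PySem.List.len l - 1 = ((l.length - 1 : Nat) : Int) := by
    rw [PySem.List.len_eq]; omega
  rw [h1, PySem.List.pyGetD_natCast, List.getLast_eq_getElem,
     List.getD_eq_getElem _ _ (by omega)]

lemma set_last {α : Type} (v : α) : ∀ (l : List α), l ≠ [] → l.set (l.length - 1) v = l.dropLast ++ [v]
  | [x], _ => by simp
  | x :: y :: ys, _ => by
      have ih := set_last v (y :: ys) (by simp)
      simp only [List.length_cons] at ih ⊢
      rw [show ys.length + 1 + 1 - 1 = (ys.length + 1 - 1) + 1 by omega,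
         List.set_cons_succ, ih]
      simp

lemma pySetD_last {α : Type} (l : List α) (v : α) (h : l ≠ []) :
    PySem.List.pySetD l (PySem.List.len l - 1) v = l.dropLast ++ [v] := by
  have hp : 0 < l.length := List.length_pos_of_ne_nil h
  have h1 : PySem.List.len l - 1 = ((l.length - 1 : Nat) : Int) := by
    rw [PySem.List.len_eq]; omega
  rw [h1, PySem.List.pySetD_natCast, set_last v l h]

lemma pySetD_zero_cons {α : Type} (x v : α) (l : List α) :
    PySem.List.pySetD (x :: l) 0 v = v :: l := by
  rw [show (0:Int) = ((0:Nat):Int) by norm_num, PySem.List.pySetD_natCast]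
  simp

lemma pyGetD_zero_append {α : Type} (l : List α) (x : α) (d : α) (h : l ≠ []) :
    PySem.List.pyGetD (l ++ [x]) 0 d = PySem.List.pyGetD l 0 d := by
  cases l with
  | nil => simp at h
  | cons a q => simp [PySem.List.pyGetD_zero_cons]

lemma pyGetD_neg_two_concat {α : Type} (l : List α) (x : α) (d : α) (h : l ≠ []) :
    PySem.List.pyGetD (l ++ [x]) (-2) d = l.getLast h := by
  have hp : 0 < l.length := List.length_pos_of_ne_nil h
  rw [PySem.List.pyGetD_neg_ofNat _ 2 _ (by omega) (by simp; omega)]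
  rw [List.getLast_eq_getElem]
  rw [List.getElem_append_left (by simp; omega)]
  congr 1
  simp only [List.length_append, List.length_cons, List.length_nil]
  omega

lemma pyGetD_neg_one_cons2_concat {α : Type} (x z y d : α) (l : List α) :
    PySem.List.pyGetD (x :: (z :: (l ++ [y]))) (-1) d = y := by
  rw [PySem.List.pyGetD_neg_one _ _ (by simp), getLast_cons2_concat]

lemma pyGetD_len_last {α : Type} (x y d : α) (l : List α) :
    PySem.List.pyGetD (x :: (l ++ [y])) (PySem.List.len (x :: (l ++ [y])) - 1) d = y := by
  rw [pyGetD_last _ _ (by simp), getLast_cons_concat]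

lemma pySetD_len_last {α : Type} (x y v : α) (l : List α) :
    PySem.List.pySetD (x :: (l ++ [y])) (PySem.List.len (x :: (l ++ [y])) - 1) v = x :: (l ++ [v]) := by
  rw [pySetD_last _ _ (by simp), dropLast_cons_concat, List.cons_append]

-- ---- projection lemmas ----

lemma hdF_cons (x : Int) (l : List Int) : hdF (x :: l) = x := by
  simp [hdF]

lemma midF_cons (x : Int) (l : List Int) (_h : l ≠ []) : midF (x :: l) = l.dropLast := by
  have h1 : PySem.List.len (x :: l) - 1 = ((l.length : Nat) : Int) := by
    simp [PySem.List.len_eq]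
  rw [midF, h1, PySem.List.slice_toNat _ (by omega) (by omega)]
  simp [List.dropLast_eq_take]

lemma lstF_cons (x : Int) (l : List Int) (h : l ≠ []) : lstF (x :: l) = l.getLast h := by
  rw [lstF, pyGetD_last _ _ (by simp), List.getLast_cons h]

lemma hdF_shape (a b : Int) (m : List Int) : hdF (a :: (m ++ [b])) = a := hdF_cons _ _

lemma midF_shape (a b : Int) (m : List Int) : midF (a :: (m ++ [b])) = m := by
  rw [midF_cons _ _ (by simp), List.dropLast_concat]

lemma lstF_shape (a b : Int) (m : List Int) : lstF (a :: (m ++ [b])) = b := by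
  rw [lstF_cons _ _ (by simp), List.getLast_concat]

lemma shape_of_two_le {r : List Int} (h : 2 ≤ r.length) :
    ∃ a m b, r = a :: (m ++ [b]) := by
  cases r with
  | nil => simp at h
  | cons a q =>
    rcases q.eq_nil_or_concat with rfl | ⟨m, b, rfl⟩
    · simp at h
    · exact ⟨a, m, b, by simp⟩

lemma midB_shape (a b : Int) (m : List Int) :
    PySem.List.slice (a :: (m ++ [b])) (some 1) (some (-1)) = m := by
  simp [PySem.List.slice, PySem.List.clampIdx, show ¬((m.length:Int)+1 < 0) by omega]

lemma midB_eq {r : List Int} (h : 2 ≤ r.length) :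
    PySem.List.slice r (some 1) (some (-1)) = midF r := by
  obtain ⟨a, m, b, rfl⟩ := shape_of_two_le h
  rw [midB_shape, midF_shape]

lemma lstN_eq {r : List Int} (h : r ≠ []) :
    PySem.List.pyGetD r (-1) 0 = lstF r := by
  rw [PySem.List.pyGetD_neg_one _ _ h, lstF, pyGetD_last _ _ h]

lemma midF_concat2 (l : List Int) (x : Int) (h : l ≠ []) :
    midF (l ++ [x]) = l.tail := by
  have h1 : PySem.List.len (l ++ [x]) - 1 = ((l.length : Nat) : Int) := by
    simp [PySem.List.len_eq]
  rw [midF, h1, PySem.List.slice_toNat _ (by omega) (by omega)]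
  cases l with
  | nil => simp at h
  | cons a q =>
    simp only [Int.toNat_one, Int.toNat_natCast, List.cons_append, List.drop_succ_cons,
      List.drop_zero, List.tail_cons, List.length_cons]
    rw [show q.length + 1 - 1 = q.length by omega]
    exact List.take_left

lemma lstF_concat (l : List Int) (x : Int) : lstF (l ++ [x]) = x := by
  rw [lstF, pyGetD_last _ _ (by simp), List.getLast_concat]

-- ---- normRow ----

lemma normRow_eq {r : List Int} (h : r ≠ []) :
    normRow r = hdF r :: (midF r ++ [lstF r]) := by
  cases r with
  | nil => simp at h
  | cons a q =>
    rcases q.eq_nil_or_concat with rfl | ⟨m, b, rfl⟩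
    · rw [normRow, hdF, midF, lstF]
      norm_num [PySem.List.slice, PySem.List.clampIdx, PySem.List.pyGetD,
        PySem.List.pyGet?, PySem.List.pyIdx?, PySem.List.len_eq]
    · simp only [List.concat_eq_append]
      rw [normRow, midB_shape, hdF_shape, midF_shape, lstF_shape,
         PySem.List.pyGetD_neg_one _ _ (by simp), getLast_cons_concat,
         PySem.List.pyGetD_zero_cons]

lemma SH_norm (rc : List (List Int)) (h : ∀ r ∈ rc, r ≠ []) : SH (rc.map normRow) := by
  intro r hr
  obtain ⟨q, hq, rfl⟩ := List.mem_map.mp hr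
  rw [normRow_eq (h q hq)]
  simp

lemma dec_norm (rc : List (List Int)) (h : ∀ r ∈ rc, r ≠ []) :
    dec (rc.map normRow) = (rc.map hdF, rc.map midF, rc.map lstF) := by
  unfold dec
  simp only [List.map_map, Prod.mk.injEq]
  refine ⟨List.map_congr_left ?_, List.map_congr_left ?_, List.map_congr_left ?_⟩ <;>
    intro r hr <;>
    simp only [Function.comp_apply, normRow_eq (h r hr)]
  · rw [hdF_shape]
  · rw [midF_shape]
  · rw [lstF_shape]

-- ---- A's build loop ----

lemma build_eq (rc : List (List Int)) : ∀ (s : List Int) (m : List (List Int)) (e : List Int),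
    rc.foldl buildA (s, m, e) = (s ++ rc.map hdF, m ++ rc.map midF, e ++ rc.map lstF) := by
  induction rc with
  | nil => intro s m e; simp
  | cons r rest ih =>
    intro s m e
    rw [List.foldl_cons, show buildA (s, m, e) r =
      (s ++ [hdF r], m ++ [midF r], e ++ [lstF r]) from rfl, ih]
    simp

-- ---- ShiftRow ----

lemma pyRotDeque_concat {α : Type} (q : List α) (x : α) :
    pyRotDeque (q ++ [x]) = x :: q := by
  unfold pyRotDeque
  rw [List.getLast?_concat, List.dropLast_concat]

lemma pyRotDeque_map {α β : Type} (f : α → β) (l : List α) :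
    pyRotDeque (l.map f) = (pyRotDeque l).map f := by
  rcases l.eq_nil_or_concat with rfl | ⟨q, x, rfl⟩
  · simp [pyRotDeque]
  · simp only [List.concat_eq_append]
    rw [List.map_append, List.map_singleton, pyRotDeque_concat, pyRotDeque_concat,
      List.map_cons]

lemma rotB_eq {α : Type} (l : List α) :
    PySem.List.slice l (some (-1)) none ++ PySem.List.slice l none (some (-1)) = pyRotDeque l := by
  rcases l.eq_nil_or_concat with rfl | ⟨q, x, rfl⟩
  · simp [pyRotDeque, PySem.List.slice]
  · simp only [List.concat_eq_append]
    rw [PySem.List.slice_from_neg_one, PySem.List.slice_to_neg_one, List.dropLast_concat,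
      pyRotDeque_concat, show (q ++ [x]).length - 1 = q.length by simp,
      List.drop_left]
    rfl

lemma pyRotDeque_mem {α : Type} (l : List α) (x : α) (h : x ∈ pyRotDeque l) : x ∈ l := by
  rcases l.eq_nil_or_concat with rfl | ⟨q, y, rfl⟩
  · simp [pyRotDeque] at h
  · simp only [List.concat_eq_append] at h ⊢
    rw [pyRotDeque_concat] at h
    rcases List.mem_cons.mp h with rfl | hx
    · simp
    · simp [hx]

lemma pyRotDeque_length {α : Type} (l : List α) : (pyRotDeque l).length = l.length := by
  rcases l.eq_nil_or_concat with rfl | ⟨q, y, rfl⟩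
  · simp [pyRotDeque]
  · simp only [List.concat_eq_append]
    rw [pyRotDeque_concat]
    simp

-- ---- Rotate: stepA on an explicit state ----

lemma stepA_rotate (s0 sl : Int) (S : List Int) (M0 ML : List Int) (Q : List (List Int))
    (e0 el : Int) (E : List Int) :
    stepA (s0 :: (S ++ [sl]), M0 :: (Q ++ [ML]), e0 :: (E ++ [el])) "Rotate" =
      ((S ++ [sl]) ++ [PySem.List.pyGetD (ML ++ [el]) 0 0],
       (s0 :: M0).dropLast :: (Q ++ [(ML ++ [el]).tail]),
       (s0 :: M0).getLast (by simp) :: e0 :: E) := by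
  unfold stepA
  rw [if_pos rfl]
  simp only [PySem.List.pyGetD_zero_cons, List.tail_cons, pySetD_zero_cons,
    PySem.List.pyGetD_neg_one _ _ (by simp : (s0 :: M0) ≠ []),
    pyGetD_neg_one_cons2_concat, dropLast_cons2_concat,
    pyGetD_len_last, pySetD_len_last]

-- ---- Rotate: the zipped comprehension of B, projected three ways ----

lemma decBody : ∀ (rs : List (List Int)), ∀ (t r0 : List Int), SH (t :: r0 :: rs) →
    ((((r0 :: rs).dropLast.zip (rs.zip (t :: r0 :: rs))).map (fun p =>
        PySem.List.pyGetD p.2.1 0 0 ::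
          (PySem.List.slice p.1 (some 1) (some (-1)) ++ [PySem.List.pyGetD p.2.2 (-1) 0]))).map hdF
      = rs.map hdF) ∧
    ((((r0 :: rs).dropLast.zip (rs.zip (t :: r0 :: rs))).map (fun p =>
        PySem.List.pyGetD p.2.1 0 0 ::
          (PySem.List.slice p.1 (some 1) (some (-1)) ++ [PySem.List.pyGetD p.2.2 (-1) 0]))).map midF
      = (r0 :: rs).dropLast.map midF) ∧
    ((((r0 :: rs).dropLast.zip (rs.zip (t :: r0 :: rs))).map (fun p =>
        PySem.List.pyGetD p.2.1 0 0 ::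
          (PySem.List.slice p.1 (some 1) (some (-1)) ++ [PySem.List.pyGetD p.2.2 (-1) 0]))).map lstF
      = (t :: r0 :: rs).dropLast.dropLast.map lstF) := by
  intro rs
  induction rs with
  | nil => intro t r0 _; simp
  | cons r1 rs' ih =>
    intro t r0 hS
    have hS' : SH (r0 :: r1 :: rs') := by
      intro r hr; exact hS r (by simp at hr ⊢; tauto)
    obtain ⟨ihA, ihB, ihC⟩ := ih r0 r1 hS'
    simp only [List.dropLast_cons₂, List.zip_cons_cons, List.map_cons]
    refine ⟨?_, ?_, ?_⟩
    · rw [ihA, hdF_cons]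
      rfl
    · rw [ihB, midF_cons _ _ (by simp), List.dropLast_concat,
        midB_eq (hS r0 (by simp))]
    · rw [ihC, lstF_cons _ _ (by simp), List.getLast_concat,
        lstN_eq (show t ≠ [] by
          have := hS t (by simp); intro hn; rw [hn] at this; simp at this)]
      rfl

-- ---- one operation commutes with dec ----

lemma step_comm (rows : List (List Int)) (op : String) (hS : SH rows)
    (hR : op = "Rotate" → 2 ≤ rows.length) :
    stepA (dec rows) op = dec (stepB rows op) ∧ SH (stepB rows op) ∧
      (stepB rows op).length = rows.length := by
  by_cases hrot : op = "Rotate"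
  · subst hrot
    have hlen2 := hR rfl
    match rows, hS, hlen2 with
    | t :: r0 :: rs, hS, _ =>
    clear hR hlen2
    -- shapes and the body/bottom split of the tail
    obtain ⟨aT, mT, bT, hT⟩ := shape_of_two_le (hS t (by simp))
    obtain ⟨body, bot, hbb⟩ := (r0 :: rs).eq_nil_or_concat.resolve_left (by simp)
    rw [List.concat_eq_append] at hbb
    have hbotmem : bot ∈ t :: r0 :: rs := by
      have : bot ∈ body ++ [bot] := by simp
      rw [← hbb] at this
      exact List.mem_cons_of_mem _ this
    obtain ⟨aB, mB, bB, hB⟩ := shape_of_two_le (hS bot hbotmem)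
    have hPmem : (t :: body).getLast (by simp) ∈ t :: r0 :: rs := by
      have hm := List.getLast_mem (show t :: body ≠ [] by simp)
      rcases List.mem_cons.mp hm with hgl | hgl
      · rw [hgl]; simp
      · refine List.mem_cons_of_mem _ ?_
        rw [hbb]
        exact List.mem_append_left _ hgl
    obtain ⟨aP, mP, bP, hP⟩ := shape_of_two_le (hS _ hPmem)
    -- B-side pieces
    have hstepB : stepB (t :: r0 :: rs) "Rotate" = rotateRows (t :: r0 :: rs) := by
      unfold stepB
      rw [if_pos rfl]
    have f1 : PySem.List.slice t none (some (-1)) = aT :: mT := by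
      rw [PySem.List.slice_to_neg_one, hT, dropLast_cons_concat]
    have f2 : (r0 :: rs).getLast (by simp) = bot := by
      have hsome : (r0 :: rs).getLast? = some bot := by
        rw [hbb]
        exact List.getLast?_concat
      have hsome2 : (r0 :: rs).getLast? = some ((r0 :: rs).getLast (by simp)) :=
        List.getLast?_eq_some_getLast (by simp)
      exact Option.some.inj (hsome2.symm.trans hsome)
    have f3 : PySem.List.pyGetD (t :: r0 :: rs) (-2) ([] : List Int)
        = (t :: body).getLast (by simp) := by
      conv_lhs => rw [show t :: r0 :: rs = (t :: body) ++ [bot] by rw [hbb, List.cons_append]]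
      exact pyGetD_neg_two_concat _ _ _ (by simp)
    have f4 : PySem.List.slice bot (some 1) none = mB ++ [bB] := by
      rw [PySem.List.slice_from_one, hB, List.tail_cons]
    have f5 : PySem.List.pyGetD ((t :: body).getLast (by simp)) (-1) (0 : Int) = bP := by
      rw [hP, lstN_eq (by simp), lstF_shape]
    have hPb : bP = lstF ((t :: body).getLast (by simp)) := by
      rw [hP, lstF_shape]
    obtain ⟨dA, dB2, dC⟩ := decBody rs t r0 hS
    have hdropR : (r0 :: rs).dropLast = body := by rw [hbb, List.dropLast_concat]
    have hdropT : (t :: r0 :: rs).dropLast = t :: body := by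
      rw [show t :: r0 :: rs = (t :: body) ++ [bot] by rw [hbb, List.cons_append],
        List.dropLast_concat]
    have hmapsH : body.map hdF ++ [hdF bot] = hdF r0 :: rs.map hdF := by
      rw [show body.map hdF ++ [hdF bot] = (body ++ [bot]).map hdF by simp, ← hbb,
        List.map_cons]
    -- projections of the new top and bottom rows
    have hT1 : hdF (PySem.List.pyGetD r0 0 0 :: (aT :: mT)) = hdF r0 := hdF_cons _ _
    have hT2 : midF (PySem.List.pyGetD r0 0 0 :: (aT :: mT)) = (aT :: mT).dropLast :=
      midF_cons _ _ (by simp)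
    have hT3 : lstF (PySem.List.pyGetD r0 0 0 :: (aT :: mT)) = (aT :: mT).getLast (by simp) :=
      lstF_cons _ _ (by simp)
    have hB1 : hdF ((mB ++ [bB]) ++ [bP]) = PySem.List.pyGetD (mB ++ [bB]) 0 0 :=
      pyGetD_zero_append _ _ _ (by simp)
    have hB2 : midF ((mB ++ [bB]) ++ [bP]) = (mB ++ [bB]).tail := midF_concat2 _ _ (by simp)
    have hB3 : lstF ((mB ++ [bB]) ++ [bP]) = bP := lstF_concat _ _
    -- A side
    have hdec : dec (t :: r0 :: rs) =
        (hdF t :: (body.map hdF ++ [hdF bot]),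
         midF t :: (body.map midF ++ [midF bot]),
         lstF t :: (body.map lstF ++ [lstF bot])) := by
      unfold dec
      rw [show t :: r0 :: rs = t :: (body ++ [bot]) by rw [hbb]]
      simp
    refine ⟨?_, ?_, ?_⟩
    · rw [hdec, stepA_rotate, hstepB, rotateRows, f2, f3, f1, f4, f5]
      unfold dec
      simp only [List.map_cons, List.map_append, List.map_nil, Prod.mk.injEq]
      refine ⟨?_, ?_, ?_⟩
      · -- start column
        have hmapsH2 : List.map hdF body ++ [aB] = hdF r0 :: rs.map hdF := by
          rw [hB, hdF_shape] at hmapsH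
          exact hmapsH
        rw [hT1, hB1, hB, hdF_shape, midF_shape, lstF_shape, dA, hmapsH2]
        simp
      · -- middle cells
        rw [hT2, hB2, dB2, hdropR, hB, midF_shape, lstF_shape, hT, hdF_shape, midF_shape]
      · -- end column
        rw [hT3, hB3, dC, hdropT, hPb,
          map_dropLast_getLast lstF (t :: body) (by simp), List.map_cons]
        rw [hT, hdF_shape, midF_shape, lstF_shape]
    · -- shape preserved
      rw [hstepB, rotateRows]
      intro r hr
      simp only [List.mem_cons, List.mem_append, List.mem_map] at hr
      rcases hr with h | ⟨p, _, h⟩ | h | h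
      · rw [h, f1]; simp
      · rw [← h]; simp
      · rw [h, f2, f4]; simp
      · simp at h
    · -- length preserved
      rw [hstepB, rotateRows]
      have hbl : body.length = rs.length := by
        have hc := congrArg List.length hbb
        simp at hc
        omega
      simp [List.length_zip]
      omega
  · by_cases hsh : op = "ShiftRow"
    · subst hsh
      have hshift : stepB rows "ShiftRow" = pyRotDeque rows := by
        unfold stepB
        rw [if_neg (by decide), if_pos rfl, rotB_eq]
      have hstepA : stepA (dec rows) "ShiftRow" =
          (pyRotDeque (dec rows).1, pyRotDeque (dec rows).2.1, pyRotDeque (dec rows).2.2) := by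
        unfold stepA
        rw [if_neg (by decide), if_pos rfl]
      refine ⟨?_, ?_, ?_⟩
      · rw [hshift, hstepA]
        unfold dec
        simp [pyRotDeque_map]
      · intro r hr
        exact hS r (pyRotDeque_mem _ _ (hshift ▸ hr))
      · rw [hshift, pyRotDeque_length]
    · have hid : stepB rows op = rows := by
        unfold stepB
        rw [if_neg hrot, if_neg hsh]
      have hidA : stepA (dec rows) op = dec rows := by
        unfold stepA
        rw [if_neg hrot, if_neg hsh]
      exact ⟨by rw [hid, hidA], by rw [hid]; exact hS, by rw [hid]⟩

-- ---- the whole loop ----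

lemma fold_comm (ops : List String) : ∀ (rows : List (List Int)), SH rows →
    ("Rotate" ∈ ops → 2 ≤ rows.length) →
    ops.foldl stepA (dec rows) = dec (ops.foldl stepB rows) ∧
      SH (ops.foldl stepB rows) ∧ (ops.foldl stepB rows).length = rows.length := by
  induction ops with
  | nil => intro rows hS _; exact ⟨rfl, hS, rfl⟩
  | cons op ops ih =>
    intro rows hS hR
    obtain ⟨h1, h2, h3⟩ := step_comm rows op hS (fun h => hR (h ▸ List.mem_cons_self))
    obtain ⟨g1, g2, g3⟩ := ih (stepB rows op) h2
      (fun h => h3 ▸ hR (List.mem_cons_of_mem _ h))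
    exact ⟨by rw [List.foldl_cons, List.foldl_cons, h1, g1], g2, by rw [List.foldl_cons, g3, h3]⟩

-- ---- reconstruction ----

lemma recon (L : List (List Int)) (hS : SH L) (n : Int) (hn : n = PySem.List.len L) :
    (PySem.List.pyRange 0 n 1).map (fun i =>
      PySem.List.pyGetD (L.map hdF) i 0 ::
        PySem.List.pyGetD (L.map midF) i [] ++ [PySem.List.pyGetD (L.map lstF) i 0]) = L := by
  subst hn
  have hmem : ∀ i ∈ PySem.List.pyRange 0 (PySem.List.len L) 1,
      (PySem.List.pyGetD (L.map hdF) i 0 ::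
        PySem.List.pyGetD (L.map midF) i [] ++ [PySem.List.pyGetD (L.map lstF) i 0])
      = PySem.List.pyGetD L i [] := by
    intro i hi
    obtain ⟨h0, h1⟩ := PySem.List.mem_pyRange_one.mp hi
    rw [PySem.List.len_eq] at h1
    have hil : i.toNat < L.length := by omega
    rw [PySem.List.pyGetD_eq_getElem _ _ h0 (by simpa),
       PySem.List.pyGetD_eq_getElem _ _ h0 (by simpa),
       PySem.List.pyGetD_eq_getElem _ _ h0 (by simpa),
       PySem.List.pyGetD_eq_getElem _ _ h0 (by simpa)]
    simp only [List.getElem_map]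
    have hsh := hS L[i.toNat] (List.getElem_mem _)
    obtain ⟨a, m, b, hr⟩ := shape_of_two_le hsh
    rw [hr, hdF_shape, midF_shape, lstF_shape, List.cons_append]
  rw [List.map_congr_left hmem]
  exact PySem.List.map_pyGetD_pyRange_zero L []

-- ===== VERDICT (by name: the statement is the Claim_ definition above) =====
theorem solution_spec : Claim_equal_solution := by
  intro rc ops _hdom hpre
  obtain ⟨hne, hrot⟩ := hpre
  show solution rc ops = solution_alt rc ops
  have hSH : SH (rc.map normRow) := SH_norm rc hne
  have hlen : "Rotate" ∈ ops → 2 ≤ (rc.map normRow).length := by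
    simpa using hrot
  obtain ⟨hcomm, hSH', hlen'⟩ := fold_comm ops (rc.map normRow) hSH hlen
  unfold solution solution_alt
  rw [build_eq]
  simp only [List.nil_append]
  rw [← dec_norm rc hne, hcomm]
  exact recon _ hSH' _ (by simp [PySem.List.len_eq, hlen'])
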